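-- pv_equiv track=rewrite | github.com/manoel-alves/Sistema_Hospitalar | utils/validacoes.py | valida_crm
-- ===== SOURCE A (Python) =====
-- def valida_crm(crm:str):
--     # xxxx/UF
--     if len(crm) != 7:
--         return False
--
--     for i in range(len(crm)):
--         if i < 4 and not crm[i].isdigit():
--             return False
--         if i == 4 and crm[i] != '/':
--             return False
--         if i > 4 and not crm[i].isalpha():
--             return False
--
--     if not valida_uf(f'{crm[5]}{crm[6]}'):
--         return False
--
--     return True
--
-- def valida_uf(uf:str):
--     estados = ['AC', 'AL', 'AP', 'AM', 'BA', 'CE',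
--                'ES', 'GO', 'MA', 'MT', 'MS', 'MG',
--                'PA', 'PB', 'PR', 'PE', 'PI', 'RJ',
--                'RN', 'RS', 'RO', 'RR', 'SC', 'SP',
--                'SE', 'TO', 'DF']
--
--     return uf.upper() in estados
-- ===== SOURCE B (Python) =====
-- # xxxx/UF validated by one membership test in a precomputed set of every valid
-- # slash-plus-state-code suffix (all letter-case variants), instead of per-position class checks
-- # plus a separate UF lookup.
--
-- ESTADOS = ['AC', 'AL', 'AP', 'AM', 'BA', 'CE',
--            'ES', 'GO', 'MA', 'MT', 'MS', 'MG',
--            'PA', 'PB', 'PR', 'PE', 'PI', 'RJ',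
--            'RN', 'RS', 'RO', 'RR', 'SC', 'SP',
--            'SE', 'TO', 'DF']
--
-- SUFIXOS = {'/' + a + b
--            for uf in ESTADOS
--            for a in (uf[0], uf[0].lower())
--            for b in (uf[1], uf[1].lower())}
--
--
-- def valida_crm(crm: str):
--     return len(crm) == 7 and crm[:4].isdigit() and crm[4:] in SUFIXOS
-- ===== Notes on version B (the rewrite author's own statement) =====
-- stated objective: alternative
-- what changed: Replaces A's per-index class loop plus a separate UF-list lookup by a single membership test in a module-level precomputed set of all 108 valid slash-plus-state-code suffixes (every letter-case variant), keeping only the length guard and a digits check on the prefix.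
import Mathlib
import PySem

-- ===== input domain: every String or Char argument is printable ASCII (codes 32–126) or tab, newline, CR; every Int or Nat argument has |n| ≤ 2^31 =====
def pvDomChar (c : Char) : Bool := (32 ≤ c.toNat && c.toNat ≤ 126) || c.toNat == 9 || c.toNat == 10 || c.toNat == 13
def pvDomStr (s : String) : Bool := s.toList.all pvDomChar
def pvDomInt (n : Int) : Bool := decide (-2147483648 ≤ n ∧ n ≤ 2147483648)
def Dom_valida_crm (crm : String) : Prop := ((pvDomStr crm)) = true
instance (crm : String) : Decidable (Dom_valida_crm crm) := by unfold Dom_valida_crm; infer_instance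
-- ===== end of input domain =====

-- B replaces A's per-position class checks + separate UF lookup by a single membership
-- test in a precomputed set of all valid slash-plus-state-code suffixes (every letter-case variant);
-- objective: alternative (same values, different data structure).

-- ===== PORT A =====
-- A-side helper: literal port of valida_uf
def valida_uf (uf : String) : Bool :=
  let estados : List String :=
    ["AC", "AL", "AP", "AM", "BA", "CE",
     "ES", "GO", "MA", "MT", "MS", "MG",
     "PA", "PB", "PR", "PE", "PI", "RJ",
     "RN", "RS", "RO", "RR", "SC", "SP",
     "SE", "TO", "DF"]
  estados.contains (PySem.Str.upper uf)

-- the for-loop with early returns: `some false` = an early `return False`, `none` = loop fell through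
def valida_crm_loopA (crm : String) : List Int → Option Bool
  | [] => none
  | i :: rest =>
    if i < 4 ∧ ¬ (PySem.Chars.isdigit (PySem.List.pyGetD crm.toList i ' ')) then some false
    else if i = 4 ∧ ¬ (PySem.List.pyGetD crm.toList i ' ' = '/') then some false
    else if 4 < i ∧ ¬ (PySem.Chars.isalpha (PySem.List.pyGetD crm.toList i ' ')) then some false
    else valida_crm_loopA crm rest

def valida_crm (crm : String) : Bool :=
  if PySem.Str.len crm ≠ 7 then false
  else
    match valida_crm_loopA crm (PySem.List.pyRange 0 (PySem.Str.len crm) 1) with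
    | some b => b
    | none =>
      -- f'{crm[5]}{crm[6]}'
      if ¬ valida_uf (String.ofList [PySem.List.pyGetD crm.toList 5 ' ', PySem.List.pyGetD crm.toList 6 ' ']) then false
      else true

-- ===== PORT B =====
-- module-level ESTADOS of Source B
def estadosB : List String :=
  ["AC", "AL", "AP", "AM", "BA", "CE",
   "ES", "GO", "MA", "MT", "MS", "MG",
   "PA", "PB", "PR", "PE", "PI", "RJ",
   "RN", "RS", "RO", "RR", "SC", "SP",
   "SE", "TO", "DF"]

-- module-level SUFIXOS of Source B: the set comprehension, built exactly as written
-- ({'/' + a + b for uf in ESTADOS for a in (uf[0], uf[0].lower()) for b in (uf[1], uf[1].lower())})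
def sufixosB : PySem.Set String :=
  PySem.Set.ofList (estadosB.flatMap (fun uf =>
    [PySem.List.pyGetD uf.toList 0 ' ',
     PySem.Chars.lowerChar (PySem.List.pyGetD uf.toList 0 ' ')].flatMap (fun a =>
      [PySem.List.pyGetD uf.toList 1 ' ',
       PySem.Chars.lowerChar (PySem.List.pyGetD uf.toList 1 ' ')].map (fun b =>
        String.ofList ['/', a, b]))))

def valida_crm_alt (crm : String) : Bool :=
  decide (PySem.Str.len crm = 7)
    && PySem.Str.strIsdigit (PySem.Str.slice crm none (some 4))
    && sufixosB.contains (PySem.Str.slice crm (some 4) none)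

-- ===== PRECONDITION & SPEC =====
def Spec_valida_crm (crm : String) (out : Bool) : Prop := out = valida_crm_alt crm
instance (crm : String) (out : Bool) : Decidable (Spec_valida_crm crm out) := by unfold Spec_valida_crm; infer_instance

-- ===== CLAIM (what is proved, stated in full; the proofs are below) =====
def Claim_equal_valida_crm : Prop := ∀ (crm : String), Dom_valida_crm crm → Spec_valida_crm crm (valida_crm crm)

-- ===== LEMMAS AND PROOFS =====

theorem char_eq_iff (a b : Char) : a = b ↔ a.toNat = b.toNat :=
  ⟨fun h => by rw [h], fun h => Char.ext (by exact_mod_cast UInt32.toNat_inj.mp h)⟩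

theorem ofNat_toNat_small (n : Nat) (h : n < 55296) : (Char.ofNat n).toNat = n := by
  have hv : n.isValidChar := Or.inl h
  simp [Char.ofNat, hv, Char.ofNatAux, Char.toNat]

theorem le_iff_toNat (a b : Char) : a ≤ b ↔ a.toNat ≤ b.toNat := by
  rw [Char.le_def, UInt32.le_iff_toNat_le]; exact Iff.rfl

theorem upperChar_eq_iff (c u : Char) (hu : 65 ≤ u.toNat) (hu2 : u.toNat ≤ 90) :
    (PySem.Chars.upperChar c = u) ↔ (c = u ∨ c = PySem.Chars.lowerChar u) := by
  have hlu : (PySem.Chars.lowerChar u).toNat = u.toNat + 32 := by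
    simp only [PySem.Chars.lowerChar, PySem.Chars.isupper]
    have h65 : (65:Nat) = Char.toNat 'A' := by decide
    have h90 : (90:Nat) = Char.toNat 'Z' := by decide
    rw [if_pos]
    · exact ofNat_toNat_small _ (by omega)
    · simp only [Bool.and_eq_true, decide_eq_true_eq, le_iff_toNat]
      omega
  simp only [PySem.Chars.upperChar, PySem.Chars.islower, char_eq_iff, hlu]
  have h97 : (97:Nat) = Char.toNat 'a' := by decide
  have h122 : (122:Nat) = Char.toNat 'z' := by decide
  split_ifs with h
  · simp only [Bool.and_eq_true, decide_eq_true_eq, le_iff_toNat, ← h97, ← h122] at h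
    rw [ofNat_toNat_small _ (by omega)]
    omega
  · simp only [Bool.and_eq_true, decide_eq_true_eq, le_iff_toNat, ← h97, ← h122, not_and_or,
      not_le] at h
    omega

theorem alpha_of_upperChar (c u : Char) (hu : 65 ≤ u.toNat) (hu2 : u.toNat ≤ 90)
    (h : PySem.Chars.upperChar c = u) : PySem.Chars.isalpha c = true := by
  rcases (upperChar_eq_iff c u hu hu2).mp h with h' | h'
  · subst h'
    simp only [PySem.Chars.isalpha, PySem.Chars.isupper, PySem.Chars.islower,
      Bool.or_eq_true, Bool.and_eq_true, decide_eq_true_eq, le_iff_toNat]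
    left
    constructor
    · have : (65:Nat) = Char.toNat 'A' := by decide
      omega
    · have : (90:Nat) = Char.toNat 'Z' := by decide
      omega
  · subst h'
    have hlu : (PySem.Chars.lowerChar u).toNat = u.toNat + 32 := by
      simp only [PySem.Chars.lowerChar, PySem.Chars.isupper]
      rw [if_pos]
      · exact ofNat_toNat_small _ (by omega)
      · simp only [Bool.and_eq_true, decide_eq_true_eq, le_iff_toNat]
        have h65 : (65:Nat) = Char.toNat 'A' := by decide
        have h90 : (90:Nat) = Char.toNat 'Z' := by decide
        omega
    simp only [PySem.Chars.isalpha, PySem.Chars.isupper, PySem.Chars.islower,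
      Bool.or_eq_true, Bool.and_eq_true, decide_eq_true_eq, le_iff_toNat]
    right
    have h97 : (97:Nat) = Char.toNat 'a' := by decide
    have h122 : (122:Nat) = Char.toNat 'z' := by decide
    omega

-- every estado is two uppercase ASCII letters
theorem estadosB_shape : ∀ uf ∈ estadosB,
    uf.toList.length = 2 ∧ uf.toList.all (fun c => 65 ≤ c.toNat ∧ c.toNat ≤ 90) := by
  decide

-- the central lemma: membership in SUFIXOS, characterised through A's valida_uf
theorem mem_sufixosB_iff (e f g : Char) :
    (String.ofList [e, f, g]) ∈ sufixosB ↔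
      (e = '/' ∧ PySem.Str.upper (String.ofList [f, g]) ∈ estadosB) := by
  unfold sufixosB
  rw [PySem.Set.mem_ofList]
  simp only [List.mem_flatMap, List.mem_map, List.mem_cons,
    List.not_mem_nil, or_false]
  constructor
  · rintro ⟨uf, hufmem, a, ha, b, hb, heq⟩
    obtain ⟨hlen, hall⟩ := estadosB_shape uf hufmem
    rw [List.length_eq_two] at hlen
    obtain ⟨x, y, hxy⟩ := hlen
    rw [hxy] at ha hb
    simp only [List.all_cons, List.all_nil, Bool.and_eq_true, decide_eq_true_eq, and_true,
      hxy] at hall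
    obtain ⟨⟨hx1, hx2⟩, hy1, hy2⟩ := hall
    have hget0 : PySem.List.pyGetD [x, y] 0 ' ' = x := by
      simp [PySem.List.pyGetD, PySem.List.pyIdx?, PySem.List.pyGet?]
    have hget1 : PySem.List.pyGetD [x, y] 1 ' ' = y := by
      simp [PySem.List.pyGetD, PySem.List.pyIdx?, PySem.List.pyGet?]
    rw [hget0] at ha
    rw [hget1] at hb
    rw [← String.toList_inj] at heq
    simp only [String.toList_ofList] at heq
    obtain ⟨he, hf, hg⟩ : '/' = e ∧ a = f ∧ b = g := by
      injection heq with h1 h2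
      injection h2 with h2 h3
      injection h3 with h3 _
      exact ⟨h1, h2, h3⟩
    refine ⟨he.symm, ?_⟩
    have hf' : PySem.Chars.upperChar f = x := by
      rw [upperChar_eq_iff f x hx1 hx2, ← hf]; exact ha
    have hg' : PySem.Chars.upperChar g = y := by
      rw [upperChar_eq_iff g y hy1 hy2, ← hg]; exact hb
    have : PySem.Str.upper (String.ofList [f, g]) = uf := by
      rw [← String.toList_inj]
      simp [PySem.Chars.upper, hxy, hf', hg']
    rw [this]; exact hufmem
  · rintro ⟨he, hmem⟩
    refine ⟨PySem.Str.upper (String.ofList [f, g]), hmem, ?_⟩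
    obtain ⟨hlen, hall⟩ := estadosB_shape _ hmem
    have htl : (PySem.Str.upper (String.ofList [f, g])).toList
        = [PySem.Chars.upperChar f, PySem.Chars.upperChar g] := by
      simp [PySem.Chars.upper]
    rw [htl] at hall
    simp only [List.all_cons, List.all_nil, Bool.and_eq_true, decide_eq_true_eq, and_true] at hall
    obtain ⟨⟨hx1, hx2⟩, hy1, hy2⟩ := hall
    have hget0 : PySem.List.pyGetD (PySem.Str.upper (String.ofList [f, g])).toList 0 ' '
        = PySem.Chars.upperChar f := by
      simp [htl, PySem.List.pyGetD, PySem.List.pyIdx?, PySem.List.pyGet?]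
    have hget1 : PySem.List.pyGetD (PySem.Str.upper (String.ofList [f, g])).toList 1 ' '
        = PySem.Chars.upperChar g := by
      simp [htl, PySem.List.pyGetD, PySem.List.pyIdx?, PySem.List.pyGet?]
    refine ⟨f, ?_, g, ?_, ?_⟩
    · rw [hget0]
      have := (upperChar_eq_iff f _ hx1 hx2).mp rfl
      exact this
    · rw [hget1]
      exact (upperChar_eq_iff g _ hy1 hy2).mp rfl
    · rw [← String.toList_inj]
      simp [he]

theorem alpha_of_uf_mem (f g : Char)
    (h : PySem.Str.upper (String.ofList [f, g]) ∈ estadosB) :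
    PySem.Chars.isalpha f = true ∧ PySem.Chars.isalpha g = true := by
  obtain ⟨hlen, hall⟩ := estadosB_shape _ h
  have htl : (PySem.Str.upper (String.ofList [f, g])).toList
      = [PySem.Chars.upperChar f, PySem.Chars.upperChar g] := by
    simp [PySem.Chars.upper]
  rw [htl] at hall
  simp only [List.all_cons, List.all_nil, Bool.and_eq_true, decide_eq_true_eq, and_true] at hall
  exact ⟨alpha_of_upperChar f _ hall.1.1 hall.1.2 rfl,
         alpha_of_upperChar g _ hall.2.1 hall.2.2 rfl⟩

theorem valida_uf_eq_mem (f g : Char) :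
    valida_uf (String.ofList [f, g])
      = decide (PySem.Str.upper (String.ofList [f, g]) ∈ estadosB) := by
  simp [valida_uf, estadosB, List.contains_eq_mem]

theorem set_contains_eq (s : PySem.Set String) (x : String) :
    s.contains x = decide (x ∈ s) := by
  simp [PySem.Set.contains]

theorem contains_sufixosB_eq (e f g : Char) :
    sufixosB.contains (String.ofList [e, f, g])
      = (decide (e = '/') && (PySem.Chars.isalpha f && (PySem.Chars.isalpha g
          && valida_uf (String.ofList [f, g])))) := by
  rw [set_contains_eq]
  by_cases hmem : (String.ofList [e, f, g]) ∈ sufixosB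
  · obtain ⟨he, hu⟩ := (mem_sufixosB_iff e f g).mp hmem
    obtain ⟨haf, hag⟩ := alpha_of_uf_mem f g hu
    subst he
    simp [hmem, haf, hag, valida_uf_eq_mem, hu]
  · rw [decide_eq_false hmem]
    rw [mem_sufixosB_iff] at hmem
    by_cases he : e = '/'
    · have hu : ¬ (PySem.Str.upper (String.ofList [f, g]) ∈ estadosB) := fun h => hmem ⟨he, h⟩
      simp [valida_uf_eq_mem, hu]
    · simp [he]

theorem valida_crm_eq_alt (crm : String) : valida_crm crm = valida_crm_alt crm := by
  by_cases h : crm.toList.length = 7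
  · have h3 : (crm.toList.take 3).length = 3 := by simp [h]
    have h4 : (crm.toList.drop 3).length = 4 := by simp [h]
    rw [List.length_eq_three] at h3
    rw [List.length_eq_four] at h4
    obtain ⟨a, b, c, h3⟩ := h3
    obtain ⟨d, e, f, g, h4⟩ := h4
    have hl : crm.toList = [a, b, c, d, e, f, g] := by
      rw [← List.take_append_drop 3 crm.toList, h3, h4]; rfl
    have hs1 : PySem.Str.slice crm none (some 4) = String.ofList [a, b, c, d] := by
      rw [← String.toList_inj]
      simp [hl, PySem.List.slice]
    have hs2 : PySem.Str.slice crm (some 4) none = String.ofList [e, f, g] := by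
      rw [← String.toList_inj]
      simp [hl, PySem.List.slice]
    have hr : PySem.List.pyRange 0 7 1 = [0, 1, 2, 3, 4, 5, 6] := by decide
    have hlen : crm.length = 7 := by simpa using h
    simp only [valida_crm, valida_crm_alt, PySem.Str.len_eq, hl, hs1, hs2,
      contains_sufixosB_eq]
    norm_num [hr, hl, hlen, valida_crm_loopA,
      PySem.List.pyGetD, PySem.List.pyIdx?, PySem.List.pyGet?,
      PySem.Chars.strIsdigit]
    cases hda : PySem.Chars.isdigit a <;>
      cases hdb : PySem.Chars.isdigit b <;>
      cases hdc : PySem.Chars.isdigit c <;>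
      cases hdd : PySem.Chars.isdigit d <;>
      cases hse : decide (e = '/') <;>
      cases haf : PySem.Chars.isalpha f <;>
      cases hag : PySem.Chars.isalpha g <;>
      simp_all
  · have hlen : ¬ ((crm.length : Int) = 7) := by
      intro hc
      have : crm.length = 7 := by exact_mod_cast hc
      exact h (by simpa using this)
    simp [valida_crm, valida_crm_alt, PySem.Str.len_eq, hlen]

-- ===== VERDICT (by name: the statement is the Claim_ definition above) =====
theorem valida_crm_spec : Claim_equal_valida_crm := by
  intro crm _
  exact valida_crm_eq_alt crm
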